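-- pv_equiv track=rewrite | github.com/go37-ai/self-model | src/extraction/contrastive_pairs.py | get_pairs_by_category
-- ===== SOURCE A (Python) =====
-- def get_pairs_by_category(
--     pairs: list[dict],
-- ) -> dict[str, list[dict]]:
--     """Group pairs by their category key.
--
--     Args:
--         pairs: List of pair dicts (as returned by load_seed_pairs).
--
--     Returns:
--         Dict mapping category key to list of pairs in that category.
--     """
--     by_category: dict[str, list[dict]] = {}
--     for pair in pairs:
--         cat = pair["category"]
--         if cat not in by_category:
--             by_category[cat] = []
--         by_category[cat].append(pair)
--     return by_category
-- ===== SOURCE B (Python) =====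
-- def get_pairs_by_category(
--     pairs: list[dict],
-- ) -> dict[str, list[dict]]:
--     """Group pairs by their category key (dedup-then-filter decomposition)."""
--     categories = list(dict.fromkeys(p["category"] for p in pairs))
--     return {cat: [p for p in pairs if p["category"] == cat] for cat in categories}
-- ===== Notes on version B (the rewrite author's own statement) =====
-- stated objective: idiomatic
-- what changed: Replaces the incremental dict-bucketing loop by a two-phase comprehension: first-appearance category list via dict.fromkeys, then a dict comprehension that filters the pairs per category.
import Mathlib
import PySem

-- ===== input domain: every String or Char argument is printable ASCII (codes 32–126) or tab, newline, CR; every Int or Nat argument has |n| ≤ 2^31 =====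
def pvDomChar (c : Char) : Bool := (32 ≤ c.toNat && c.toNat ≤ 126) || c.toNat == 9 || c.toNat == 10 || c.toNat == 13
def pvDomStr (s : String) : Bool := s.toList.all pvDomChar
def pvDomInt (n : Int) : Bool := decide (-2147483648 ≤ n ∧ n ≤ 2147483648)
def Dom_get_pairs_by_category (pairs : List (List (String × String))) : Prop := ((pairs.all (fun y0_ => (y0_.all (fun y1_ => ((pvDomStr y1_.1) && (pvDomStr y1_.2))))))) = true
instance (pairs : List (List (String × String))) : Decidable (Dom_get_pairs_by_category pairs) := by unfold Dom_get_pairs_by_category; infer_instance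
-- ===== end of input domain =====

-- B replaces A's one-pass dict bucketing by dedup-of-categories then a per-category filter; same return value, no speed claim.

-- ===== PORT A =====
-- pair["category"]: first-match lookup in the association list (Pre_ excludes the KeyError case; "" is never reached inside Pre_)
def pvCat (pair : List (String × String)) : String := (pair.lookup "category").getD ""

def get_pairs_by_category (pairs : List (List (String × String))) : List (String × List (List (String × String))) :=
  (pairs.foldl (fun by_category pair =>
      let cat := pvCat pair
      let by_category := if by_category.contains cat then by_category else by_category.insert cat []
      by_category.modify cat [] (fun l => l ++ [pair]))
    (PySem.Dict.empty : PySem.Dict String (List (List (String × String))))).items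

-- ===== PORT B =====
def get_pairs_by_category_alt (pairs : List (List (String × String))) : List (String × List (List (String × String))) :=
  (PySem.List.dedup (pairs.map pvCat)).map (fun cat => (cat, pairs.filter (fun p => pvCat p == cat)))

-- ===== PRECONDITION & SPEC =====
-- Pre_ excludes exactly the pairs missing the "category" key, on which both Pythons raise KeyError.
def Pre_get_pairs_by_category (pairs : List (List (String × String))) : Prop :=
  ∀ p ∈ pairs, "category" ∈ p.map Prod.fst
instance (pairs : List (List (String × String))) : Decidable (Pre_get_pairs_by_category pairs) := by unfold Pre_get_pairs_by_category; infer_instance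

def pvWitness_get_pairs_by_category : (List (List (String × String))) := [[("category", "a"), ("x", "1")], [("category", "b")], [("category", "a")]]

def Spec_get_pairs_by_category (pairs : List (List (String × String))) (out : List (String × List (List (String × String)))) : Prop := out = get_pairs_by_category_alt pairs
instance (pairs : List (List (String × String))) (out : List (String × List (List (String × String)))) : Decidable (Spec_get_pairs_by_category pairs out) := by unfold Spec_get_pairs_by_category; infer_instance

-- ===== CLAIM (what is proved, stated in full; the proofs are below) =====
def Claim_equal_get_pairs_by_category : Prop := ∀ (pairs : List (List (String × String))), Dom_get_pairs_by_category pairs → Pre_get_pairs_by_category pairs → Spec_get_pairs_by_category pairs (get_pairs_by_category pairs)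

-- ===== LEMMAS AND PROOFS =====

-- A's loop body (conditional insert of [] then append) is exactly Dict.modify with default [].
theorem pvStep_eq (d : PySem.Dict String (List (List (String × String)))) (k : String)
    (f : List (List (String × String)) → List (List (String × String))) :
    (if d.contains k then d else d.insert k []).modify k [] f = d.modify k [] f := by
  by_cases h : d.contains k
  · simp [h]
  · have h' : d.contains k = false := eq_false_of_ne_true h
    simp [h', PySem.Dict.modify, PySem.Dict.insert_insert_self,
      PySem.Dict.getD_insert_self, PySem.Dict.getD_of_not_contains d [] h']

theorem get_pairs_by_category_eq_alt (pairs : List (List (String × String))) :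
    get_pairs_by_category pairs = get_pairs_by_category_alt pairs := by
  unfold get_pairs_by_category get_pairs_by_category_alt
  have hbody : (fun (d : PySem.Dict String (List (List (String × String)))) pair =>
      let cat := pvCat pair
      let d' := if d.contains cat then d else d.insert cat []
      d'.modify cat [] (fun l => l ++ [pair]))
      = fun d pair => d.modify (pvCat pair) [] (fun l => l ++ [pair]) := by
    funext d pair
    exact pvStep_eq d (pvCat pair) (fun l => l ++ [pair])
  rw [hbody]
  have hmap : pairs.foldl (fun d pair => d.modify (pvCat pair) [] (fun l => l ++ [pair]))
        (PySem.Dict.empty : PySem.Dict String (List (List (String × String))))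
      = (pairs.map (fun p => (pvCat p, p))).foldl
          (fun d q => d.modify q.1 [] (fun l => l ++ [q.2])) PySem.Dict.empty := by
    rw [List.foldl_map]
  rw [hmap]
  set l := pairs.map (fun p => (pvCat p, p)) with hl
  set D := l.foldl (fun d q => d.modify q.1 [] (fun l => l ++ [q.2]))
      (PySem.Dict.empty : PySem.Dict String (List (List (String × String)))) with hD
  have hnodup : D.keys.Nodup := by
    rw [hD]
    exact PySem.Dict.nodup_keys_foldl_modify_key l Prod.fst []
      (fun d q => (fun v => v ++ [q.2])) PySem.Dict.empty (by simp)
  have hkeys : D.keys = PySem.List.dedup (pairs.map pvCat) := by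
    rw [hD]
    rw [PySem.Dict.keys_foldl_modify_key l Prod.fst []
      (fun d q => (fun v => v ++ [q.2]))
      (PySem.Dict.empty : PySem.Dict String (List (List (String × String))))]
    simp [hl, List.map_map, PySem.List.dedup_eq_ofList, PySem.Set.update_nil_left,
      Function.comp_def]
  have hgetD : ∀ c, D.getD c [] = pairs.filter (fun p => pvCat p == c) := by
    intro c
    rw [hD]
    rw [PySem.Dict.getD_foldl_modify_append]
    simp [hl, List.filter_map, Function.comp_def]
  rw [PySem.Dict.items_eq_map_keys D hnodup [], hkeys]
  refine List.map_congr_left (fun c _ => ?_)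
  rw [hgetD c]

-- ===== VERDICT (by name: the statement is the Claim_ definition above) =====
theorem get_pairs_by_category_spec : Claim_equal_get_pairs_by_category := by
  intro pairs _ _
  exact get_pairs_by_category_eq_alt pairs
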